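-- pv_equiv track=rewrite | github.com/jdalzatec/vegas | analyzers/vegas-analyzer-heisenberg.py | get_equals
-- ===== SOURCE A (Python) =====
-- def get_equals(lista):
--     elements = [{i} for i in range(len(lista))]
--     for i, val1 in enumerate(lista):
--         for j in range(i + 1, len(lista)):
--             if (val1 == lista[j]):
--                 elements[i].add(j)
--             else:
--                 break
--
--     lista2 = list(reversed(lista))
--     elements2 = [{len(lista) - 1 - i} for i in range(len(lista))]
--     for i, val1 in enumerate(lista2):
--         for j in range(i + 1, len(lista2)):
--             if (val1 == lista2[j]):
--                 elements2[i].add(len(lista) - 1 - j)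
--             else:
--                 break
--     elements2 = list(reversed(elements2))
--     final_elements = [tuple(sorted(elements[i] | elements2[i]))
--                       for i in range(len(lista))]
--     return sorted(set(final_elements))
-- ===== SOURCE B (Python) =====
-- def get_equals(lista):
--     # Single left-to-right pass: group maximal runs of consecutive equal
--     # elements; each run is emitted as the tuple of its indices, already
--     # in sorted order.
--     res = []
--     i = 0
--     n = len(lista)
--     while i < n:
--         j = i
--         while j + 1 < n and lista[j + 1] == lista[i]:
--             j += 1
--         res.append(tuple(range(i, j + 1)))
--         i = j + 1
--     return res
-- ===== Notes on version B (the rewrite author's own statement) =====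
-- stated objective: faster
-- what changed: Replaced A's O(n^2) per-index forward and backward equal-run scans plus set unions, tuple sorting and global dedup-sort by a single left-to-right pass that groups maximal runs of consecutive equal elements and emits each run's index range once, already in order.
import Mathlib
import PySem

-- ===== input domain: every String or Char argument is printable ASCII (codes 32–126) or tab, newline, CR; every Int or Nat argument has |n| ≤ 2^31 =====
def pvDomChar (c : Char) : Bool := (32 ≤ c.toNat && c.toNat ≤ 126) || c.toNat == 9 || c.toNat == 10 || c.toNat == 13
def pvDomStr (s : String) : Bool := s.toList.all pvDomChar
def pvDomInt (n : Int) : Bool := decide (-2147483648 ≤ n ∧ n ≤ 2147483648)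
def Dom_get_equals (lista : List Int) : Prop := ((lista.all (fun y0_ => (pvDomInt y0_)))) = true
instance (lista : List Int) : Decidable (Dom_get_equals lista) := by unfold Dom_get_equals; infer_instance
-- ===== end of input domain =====

-- B replaces A's quadratic per-index forward/backward scans and set machinery by one
-- left-to-right pass that groups maximal runs of consecutive equal elements (objective: faster).

-- ===== PORT A =====

def pyAtA (lista : List Int) (j : Int) : Int := PySem.List.pyGetD lista j 0

def innerA (lista : List Int) (val1 : Int) (emb : Int → Int) : PySem.Set Int → List Int → PySem.Set Int
  | s, [] => s
  | s, j :: rest =>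
    if pyAtA lista j = val1 then innerA lista val1 emb (PySem.Set.add s (emb j)) rest else s

def get_equals (lista : List Int) : List (List Int) :=
  let n : Int := lista.length
  let elements : List (PySem.Set Int) :=
    (PySem.List.enumerate lista).map (fun p =>
      innerA lista p.2 (fun j => j) (PySem.Set.ofList [p.1]) (PySem.List.pyRange (p.1 + 1) n 1))
  let lista2 := lista.reverse
  let elements2 : List (PySem.Set Int) :=
    ((PySem.List.enumerate lista2).map (fun p =>
      innerA lista2 p.2 (fun j => n - 1 - j) (PySem.Set.ofList [n - 1 - p.1]) (PySem.List.pyRange (p.1 + 1) n 1))).reverse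
  let final : List (List Int) :=
    (PySem.List.pyRange 0 n 1).map (fun i =>
      PySem.List.sorted (PySem.Set.union (PySem.List.pyGetD elements i PySem.Set.empty)
                                         (PySem.List.pyGetD elements2 i PySem.Set.empty)) (fun x => x) false)
  PySem.List.sorted (PySem.Set.ofList final) (fun x => x) false

def runLenB (x : Int) : List Int → Nat
  | [] => 0
  | y :: ys => if y = x then runLenB x ys + 1 else 0

def goB (i : Int) : List Int → List (List Int)
  | [] => []
  | x :: xs =>
    let k := runLenB x xs
    PySem.List.pyRange i (i + (k:Int) + 1) 1 :: goB (i + (k:Int) + 1) (xs.drop k)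
termination_by l => l.length
decreasing_by simp

def get_equals_alt (lista : List Int) : List (List Int) := goB 0 lista

-- ===== PRECONDITION & SPEC =====
def Spec_get_equals (lista : List Int) (out : List (List Int)) : Prop := out = get_equals_alt lista
instance (lista : List Int) (out : List (List Int)) : Decidable (Spec_get_equals lista out) := by unfold Spec_get_equals; infer_instance

-- ===== CLAIM (what is proved, stated in full; the proofs are below) =====
def Claim_equal_get_equals : Prop := ∀ (lista : List Int), Dom_get_equals lista → Spec_get_equals lista (get_equals lista)

-- ===== LEMMAS AND PROOFS =====


theorem tw_congr {α : Type} (p q : α → Bool) (l : List α) (h : ∀ a ∈ l, p a = q a) :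
    l.takeWhile p = l.takeWhile q := by
  induction l with
  | nil => rfl
  | cons x xs ih =>
    have hx := h x (by simp)
    by_cases hp : p x
    · rw [List.takeWhile_cons_of_pos hp, List.takeWhile_cons_of_pos (hx ▸ hp),
        ih (fun a ha => h a (by simp [ha]))]
    · rw [List.takeWhile_cons_of_neg hp, List.takeWhile_cons_of_neg (hx ▸ hp)]

theorem take_pyRange (a b : Int) (m : Nat) (hm : m ≤ (b - a).toNat) :
    (PySem.List.pyRange a b 1).take m = PySem.List.pyRange a (a + m) 1 := by
  rw [PySem.List.pyRange_one, PySem.List.pyRange_one, ← List.map_take, List.take_range]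
  have h1 : (a + (m:Int) - a).toNat = m := by omega
  rw [h1]
  have h2 : min m (b - a).toNat = m := by omega
  rw [h2]
theorem tw_pyRange (p : Int → Bool) (a b : Int) :
    (PySem.List.pyRange a b 1).takeWhile p
      = PySem.List.pyRange a (a + ((PySem.List.pyRange a b 1).takeWhile p).length) 1 := by
  have hp := List.takeWhile_prefix (l := PySem.List.pyRange a b 1) p
  have hl : ((PySem.List.pyRange a b 1).takeWhile p).length ≤ (b - a).toNat := by
    simpa [PySem.List.length_pyRange_one] using hp.length_le
  conv_lhs => rw [List.prefix_iff_eq_take.mp hp]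
  exact take_pyRange a b _ hl

theorem tw_pyRange_of (p : Int → Bool) (a c b : Int) (h1 : a ≤ c) (h2 : c ≤ b)
    (hall : ∀ j, a ≤ j → j < c → p j = true) (hstop : c = b ∨ p c = false) :
    (PySem.List.pyRange a b 1).takeWhile p = PySem.List.pyRange a c 1 := by
  rw [PySem.List.pyRange_one_append a c b h1 h2, List.takeWhile_append]
  have h3 : (PySem.List.pyRange a c 1).takeWhile p = PySem.List.pyRange a c 1 := by
    rw [List.takeWhile_eq_self_iff.mpr]
    intro j hj
    rw [PySem.List.mem_pyRange_one] at hj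
    exact hall j hj.1 hj.2
  rcases hstop with rfl | hc
  · simp [h3]
  · rw [if_pos (by rw [h3])]
    have : (PySem.List.pyRange c b 1).takeWhile p = [] := by
      rcases lt_or_ge c b with h | h
      · rw [PySem.List.pyRange_one_cons h, List.takeWhile_cons_of_neg (by simp [hc])]
      · simp [PySem.List.pyRange_one_eq_nil h]
    simp [this]

theorem pyRange_map_add (a b c : Int) :
    PySem.List.pyRange (a + c) (b + c) 1 = (PySem.List.pyRange a b 1).map (· + c) := by
  rw [PySem.List.pyRange_one, PySem.List.pyRange_one, List.map_map]
  have : b + c - (a + c) = b - a := by ring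
  rw [this]
  congr 1
  funext k
  simp; ring

theorem innerA_eq (l : List Int) (v : Int) (emb : Int → Int) (js : List Int) :
    ∀ s, innerA l v emb s js
      = PySem.Set.update s ((js.takeWhile (fun j => decide (pyAtA l j = v))).map emb) := by
  induction js with
  | nil => intro s; simp [innerA, PySem.Set.update_nil]
  | cons j rest ih =>
    intro s
    by_cases h : pyAtA l j = v
    · rw [innerA, if_pos h, ih, List.takeWhile_cons_of_pos (by simp [h]), List.map_cons,
        PySem.Set.update_cons]
    · rw [innerA, if_neg h, List.takeWhile_cons_of_neg (by simp [h]), List.map_nil,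
        PySem.Set.update_nil]

def twF (l : List Int) (i : Int) : List Int :=
  (PySem.List.pyRange (i+1) (l.length:Int) 1).takeWhile (fun j => decide (pyAtA l j = pyAtA l i))
def twB (l : List Int) (i : Int) : List Int :=
  (PySem.List.pyRange ((l.length:Int) - i) (l.length:Int) 1).takeWhile
    (fun j => decide (pyAtA l.reverse j = pyAtA l.reverse ((l.length:Int) - 1 - i)))
def tF (l : List Int) (i : Int) : Int := (twF l i).length
def tB (l : List Int) (i : Int) : Int := (twB l i).length
def Fiv (l : List Int) (i : Int) : List Int :=
  PySem.List.pyRange (i - tB l i) (i + tF l i + 1) 1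

theorem tF_nonneg (l : List Int) (i : Int) : 0 ≤ tF l i := Int.natCast_nonneg _
theorem tB_nonneg (l : List Int) (i : Int) : 0 ≤ tB l i := Int.natCast_nonneg _

theorem twF_eq (l : List Int) (i : Int) :
    twF l i = PySem.List.pyRange (i+1) (i+1+tF l i) 1 := tw_pyRange _ _ _
theorem twB_eq (l : List Int) (i : Int) :
    twB l i = PySem.List.pyRange ((l.length:Int)-i) ((l.length:Int)-i+tB l i) 1 := tw_pyRange _ _ _

theorem mem_twF (l : List Int) (i x : Int) : x ∈ twF l i ↔ i+1 ≤ x ∧ x < i+1+tF l i := by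
  rw [twF_eq, PySem.List.mem_pyRange_one]
theorem mem_twB (l : List Int) (i x : Int) :
    x ∈ twB l i ↔ (l.length:Int)-i ≤ x ∧ x < (l.length:Int)-i+tB l i := by
  rw [twB_eq, PySem.List.mem_pyRange_one]
theorem elements_at (l : List Int) (i : Int) (h0 : 0 ≤ i) (hn : i < (l.length:Int)) :
    PySem.List.pyGetD ((PySem.List.enumerate l).map (fun p =>
        innerA l p.2 (fun j => j) (PySem.Set.ofList [p.1])
          (PySem.List.pyRange (p.1 + 1) (l.length:Int) 1))) i PySem.Set.empty
    = PySem.Set.update [i] (twF l i) := by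
  have hlen : i < (((PySem.List.enumerate l).map (fun p =>
      innerA l p.2 (fun j => j) (PySem.Set.ofList [p.1])
        (PySem.List.pyRange (p.1 + 1) (l.length:Int) 1))).length : Int) := by
    simpa [PySem.List.length_enumerate] using hn
  rw [PySem.List.pyGetD_eq_getElem _ _ h0 hlen]
  have hk : i.toNat < l.length := by omega
  rw [List.getElem_map, PySem.List.getElem_enumerate]
  have h1 : ((0:Int) + (i.toNat:Int)) = i := by omega
  have h2 : l[i.toNat] = pyAtA l i := by
    rw [pyAtA, PySem.List.pyGetD_eq_getElem _ _ h0 (by simpa using hn)]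
  rw [h1, h2, innerA_eq]
  rw [PySem.Set.ofList_eq_self_of_nodup _ (List.nodup_singleton i)]
  simp [twF]
theorem elements2_at (l : List Int) (i : Int) (h0 : 0 ≤ i) (hn : i < (l.length:Int)) :
    PySem.List.pyGetD (((PySem.List.enumerate l.reverse).map (fun p =>
        innerA l.reverse p.2 (fun j => (l.length:Int) - 1 - j)
          (PySem.Set.ofList [(l.length:Int) - 1 - p.1])
          (PySem.List.pyRange (p.1 + 1) (l.length:Int) 1))).reverse) i PySem.Set.empty
    = PySem.Set.update [i] ((twB l i).map (fun j => (l.length:Int) - 1 - j)) := by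
  have hlen : i < ((((PySem.List.enumerate l.reverse).map (fun p =>
      innerA l.reverse p.2 (fun j => (l.length:Int) - 1 - j)
        (PySem.Set.ofList [(l.length:Int) - 1 - p.1])
        (PySem.List.pyRange (p.1 + 1) (l.length:Int) 1))).reverse).length : Int) := by
    simpa [PySem.List.length_enumerate] using hn
  rw [PySem.List.pyGetD_eq_getElem _ _ h0 hlen]
  rw [List.getElem_reverse]
  have hidx : (List.map (fun p =>
      innerA l.reverse p.2 (fun j => (l.length:Int) - 1 - j)
        (PySem.Set.ofList [(l.length:Int) - 1 - p.1])
        (PySem.List.pyRange (p.1 + 1) (l.length:Int) 1))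
      (PySem.List.enumerate l.reverse)).length - 1 - i.toNat = ((l.length:Int) - 1 - i).toNat := by
    simp [PySem.List.length_enumerate]; omega
  simp only [hidx]
  rw [List.getElem_map, PySem.List.getElem_enumerate]
  have h1 : ((0:Int) + ((((l.length:Int) - 1 - i).toNat : Nat) : Int)) = (l.length:Int) - 1 - i := by
    omega
  rw [h1]
  have h2 : l.reverse[(((l.length:Int) - 1 - i).toNat)]'(by simp; omega)
      = pyAtA l.reverse ((l.length:Int) - 1 - i) := by
    rw [pyAtA, PySem.List.pyGetD_eq_getElem _ _ (by omega) (by simp; omega)]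
  rw [h2, innerA_eq]
  have h3 : (l.length:Int) - 1 - ((l.length:Int) - 1 - i) = i := by omega
  have h4 : (l.length:Int) - 1 - i + 1 = (l.length:Int) - i := by omega
  rw [h3, h4, PySem.Set.ofList_eq_self_of_nodup _ (List.nodup_singleton i)]
  rfl
theorem per_index (l : List Int) (i : Int) :
    PySem.List.sorted (PySem.Set.union
        (PySem.Set.update [i] (twF l i))
        (PySem.Set.update [i] ((twB l i).map (fun j => (l.length:Int) - 1 - j))))
      (fun x => x) false = Fiv l i := by
  have htF : 0 ≤ tF l i := tF_nonneg l i
  have htB : 0 ≤ tB l i := tB_nonneg l i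
  apply PySem.List.sorted_eq_of_perm_of_pairwise_lt
  · apply (List.perm_ext_iff_of_nodup (PySem.List.nodup_pyRange_one _ _) (PySem.Set.nodup_union _ _ (PySem.Set.nodup_update _ _ (List.nodup_singleton i)))).mpr
    intro x
    rw [PySem.List.mem_pyRange_one, PySem.Set.mem_union, PySem.Set.mem_update,
      PySem.Set.mem_update]
    simp only [List.mem_singleton, List.mem_map, mem_twF, mem_twB]
    constructor
    · rintro ⟨hl, hr⟩
      rcases lt_trichotomy x i with h | h | h
      · refine Or.inr (Or.inr ⟨(l.length:Int) - 1 - x, ⟨by omega, by omega⟩, by omega⟩)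
      · exact Or.inl (Or.inl h)
      · exact Or.inl (Or.inr ⟨by omega, by omega⟩)
    · rintro ((h | ⟨h1, h2⟩) | (h | ⟨j, ⟨hj1, hj2⟩, hjx⟩)) <;> omega
  · exact PySem.List.pairwise_lt_pyRange_one _ _
theorem A_reduce (l : List Int) :
    get_equals l = PySem.List.sorted
      (PySem.Set.ofList ((PySem.List.pyRange 0 (l.length:Int) 1).map (Fiv l)))
      (fun x => x) false := by
  simp only [get_equals]
  congr 1
  apply congrArg
  apply List.map_congr_left
  intro a ha
  rw [PySem.List.mem_pyRange_one] at ha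
  rw [elements_at l a ha.1 ha.2, elements2_at l a ha.1 ha.2, per_index]
theorem runLenB_take (x : Int) (xs : List Int) :
    xs.take (runLenB x xs) = List.replicate (runLenB x xs) x := by
  induction xs with
  | nil => simp [runLenB]
  | cons y ys ih =>
    by_cases h : y = x
    · subst h
      simp only [runLenB, if_pos]
      rw [List.take_succ_cons, List.replicate_succ, ih]
    · simp only [runLenB]
      rw [if_neg h]
      simp

theorem runLenB_stop (x : Int) (xs : List Int) (y : Int)
    (h : (xs.drop (runLenB x xs)).head? = some y) : y ≠ x := by
  induction xs with
  | nil => simp [runLenB] at h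
  | cons z ys ih =>
    by_cases hz : z = x
    · subst hz
      simp only [runLenB, if_pos] at h
      rw [List.drop_succ_cons] at h
      exact ih h
    · simp only [runLenB] at h
      rw [if_neg hz, List.drop_zero] at h
      simp at h
      subst h
      exact hz

theorem pyAt_decomp (x : Int) (k : Nat) (rest : List Int) (j : Int)
    (h0 : 0 ≤ j) (hj : j < ((List.replicate (k+1) x ++ rest).length : Int)) :
    pyAtA (List.replicate (k+1) x ++ rest) j
      = if j ≤ (k:Int) then x else pyAtA rest (j - (k+1)) := by
  rw [pyAtA, PySem.List.pyGetD_eq_getElem _ _ h0 hj]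
  by_cases h : j ≤ (k:Int)
  · rw [if_pos h, List.getElem_append_left (by simp; omega)]
    simp
  · rw [if_neg h, pyAtA, PySem.List.pyGetD_eq_getElem _ _ (by omega) (by simp at hj ⊢; omega)]
    rw [List.getElem_append_right (by simp; omega)]
    congr 1
    simp
    omega

theorem pyAt_rev_decomp (x : Int) (k : Nat) (rest : List Int) (j : Int)
    (h0 : 0 ≤ j) (hj : j < ((List.replicate (k+1) x ++ rest).length : Int)) :
    pyAtA (List.replicate (k+1) x ++ rest).reverse j
      = if j < (rest.length:Int) then pyAtA rest.reverse j else x := by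
  rw [pyAtA, PySem.List.pyGetD_eq_getElem _ _ h0 (by simp at hj ⊢; omega)]
  rw [List.getElem_reverse]
  by_cases h : j < (rest.length:Int)
  · rw [if_pos h, pyAtA, PySem.List.pyGetD_eq_getElem _ _ h0 (by simp at hj ⊢; omega)]
    rw [List.getElem_reverse, List.getElem_append_right (by simp; omega)]
    congr 1
    simp at hj ⊢
    omega
  · rw [if_neg h, List.getElem_append_left (by simp at hj ⊢; omega)]
    simp
theorem tF_low (x : Int) (k : Nat) (rest : List Int)
    (hstop : ∀ y, rest.head? = some y → y ≠ x) (i : Int) (h0 : 0 ≤ i) (hi : i ≤ (k:Int)) :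
    tF (List.replicate (k+1) x ++ rest) i = (k:Int) - i := by
  have hvi : pyAtA (List.replicate (k+1) x ++ rest) i = x := by
    rw [pyAt_decomp x k rest i h0 (by simp; omega), if_pos hi]
  unfold tF twF
  rw [tw_pyRange_of _ _ ((k:Int)+1) _ (by omega) (by simp)
    (by
      intro j hj1 hj2
      rw [hvi, pyAt_decomp x k rest j (by omega) (by simp; omega), if_pos (by omega)]
      simp)
    (by
      by_cases hre : rest = []
      · left; simp [hre]
      · right
        have hlp : 0 < rest.length := List.length_pos_iff.mpr hre
        rw [hvi, pyAt_decomp x k rest ((k:Int)+1) (by omega) (by simp; omega)]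
        rw [if_neg (by omega)]
        have h00 : (k:Int)+1 - ((k:Int)+1) = 0 := by ring
        rw [h00, pyAtA, PySem.List.pyGetD_eq_getElem _ _ le_rfl (by simp; omega)]
        simp only [Int.toNat_zero]
        have := hstop (rest[0]'hlp) (by rw [List.head?_eq_getElem?, List.getElem?_eq_getElem hlp])
        simp [this])]
  rw [PySem.List.length_pyRange_one]
  omega
theorem tB_low (x : Int) (k : Nat) (rest : List Int) (i : Int) (h0 : 0 ≤ i) (hi : i ≤ (k:Int)) :
    tB (List.replicate (k+1) x ++ rest) i = i := by
  have hvi : pyAtA (List.replicate (k+1) x ++ rest).reverse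
      (((List.replicate (k+1) x ++ rest).length:Int) - 1 - i) = x := by
    rw [pyAt_rev_decomp x k rest _ (by simp; omega) (by simp; omega), if_neg (by simp; omega)]
  unfold tB twB
  rw [hvi, tw_pyRange_of _ _ (((List.replicate (k+1) x ++ rest).length:Int)) _
    (by simp; omega) (by simp)
    (by
      intro j hj1 hj2
      rw [pyAt_rev_decomp x k rest j (by simp at hj1 ⊢; omega) (by simp at hj2 ⊢; omega),
        if_neg (by simp at hj1 ⊢; omega)]
      simp)
    (Or.inl rfl)]
  rw [PySem.List.length_pyRange_one]
  simp
  omega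
theorem tF_high (x : Int) (k : Nat) (rest : List Int) (i : Int)
    (hi : (k:Int)+1 ≤ i) (hn : i < ((List.replicate (k+1) x ++ rest).length:Int)) :
    tF (List.replicate (k+1) x ++ rest) i = tF rest (i - ((k:Int)+1)) := by
  have hR : ((List.replicate (k+1) x ++ rest).length:Int) = (rest.length:Int) + ((k:Int)+1) := by
    simp; omega
  have hvi : pyAtA (List.replicate (k+1) x ++ rest) i = pyAtA rest (i - ((k:Int)+1)) := by
    rw [pyAt_decomp x k rest i (by omega) hn, if_neg (by omega)]
  unfold tF twF
  have hsplit : PySem.List.pyRange (i+1) ((List.replicate (k+1) x ++ rest).length:Int) 1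
      = (PySem.List.pyRange (i - ((k:Int)+1) + 1) (rest.length:Int) 1).map (· + ((k:Int)+1)) := by
    rw [← pyRange_map_add]
    rw [hR]
    congr 1
    ring
  rw [hsplit, List.takeWhile_map, List.length_map]
  congr 2
  apply tw_congr
  intro j hj
  rw [PySem.List.mem_pyRange_one] at hj
  simp only [Function.comp_apply]
  rw [hvi, pyAt_decomp x k rest (j + ((k:Int)+1)) (by omega) (by rw [hR]; omega),
    if_neg (by omega)]
  have : j + ((k:Int)+1) - ((k:Int)+1) = j := by ring
  rw [this]
theorem tB_high (x : Int) (k : Nat) (rest : List Int)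
    (hstop : ∀ y, rest.head? = some y → y ≠ x) (i : Int)
    (hi : (k:Int)+1 ≤ i) (hn : i < ((List.replicate (k+1) x ++ rest).length:Int)) :
    tB (List.replicate (k+1) x ++ rest) i = tB rest (i - ((k:Int)+1)) := by
  have hR : (((List.replicate (k+1) x ++ rest).length):Int) = (rest.length:Int) + ((k:Int)+1) := by
    simp; omega
  have hRpos : 0 < rest.length := by omega
  have hr0 : 0 ≤ ((List.replicate (k+1) x ++ rest).length:Int) - 1 - i := by omega
  have hrR : ((List.replicate (k+1) x ++ rest).length:Int) - 1 - i < (rest.length:Int) := by omega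
  have hval : pyAtA (List.replicate (k+1) x ++ rest).reverse
        (((List.replicate (k+1) x ++ rest).length:Int) - 1 - i)
      = pyAtA rest.reverse (((List.replicate (k+1) x ++ rest).length:Int) - 1 - i) := by
    rw [pyAt_rev_decomp x k rest _ hr0 (by omega), if_pos hrR]
  have hval2 : (rest.length:Int) - 1 - (i - ((k:Int)+1))
      = ((List.replicate (k+1) x ++ rest).length:Int) - 1 - i := by omega
  have hstart : (rest.length:Int) - (i - ((k:Int)+1))
      = ((List.replicate (k+1) x ++ rest).length:Int) - i := by omega
  unfold tB twB
  rw [hval2, hstart]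
  have hq : ∀ j ∈ PySem.List.pyRange (((List.replicate (k+1) x ++ rest).length:Int) - i)
      (rest.length:Int) 1,
      (fun j => decide (pyAtA rest.reverse j
          = pyAtA rest.reverse (((List.replicate (k+1) x ++ rest).length:Int) - 1 - i))) j
      = (fun j => decide (pyAtA (List.replicate (k+1) x ++ rest).reverse j
          = pyAtA (List.replicate (k+1) x ++ rest).reverse
              (((List.replicate (k+1) x ++ rest).length:Int) - 1 - i))) j := by
    intro j hj
    rw [PySem.List.mem_pyRange_one] at hj
    simp only
    rw [hval, pyAt_rev_decomp x k rest j (by omega) (by omega), if_pos (by omega)]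
  rw [tw_congr _ _ _ hq]
  rw [PySem.List.pyRange_one_append (((List.replicate (k+1) x ++ rest).length:Int) - i)
    (rest.length:Int) ((List.replicate (k+1) x ++ rest).length:Int) (by omega) (by omega),
    List.takeWhile_append]
  by_cases hc : ((PySem.List.pyRange (((List.replicate (k+1) x ++ rest).length:Int) - i)
      (rest.length:Int) 1).takeWhile
        (fun j => decide (pyAtA (List.replicate (k+1) x ++ rest).reverse j
          = pyAtA (List.replicate (k+1) x ++ rest).reverse
              (((List.replicate (k+1) x ++ rest).length:Int) - 1 - i)))).length
      = (PySem.List.pyRange (((List.replicate (k+1) x ++ rest).length:Int) - i)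
          (rest.length:Int) 1).length
  · rw [if_pos hc]
    have hfirst := (List.takeWhile_prefix (l := PySem.List.pyRange
        (((List.replicate (k+1) x ++ rest).length:Int) - i) (rest.length:Int) 1)
      (fun j => decide (pyAtA (List.replicate (k+1) x ++ rest).reverse j
          = pyAtA (List.replicate (k+1) x ++ rest).reverse
              (((List.replicate (k+1) x ++ rest).length:Int) - 1 - i)))).eq_of_length hc
    -- the whole first block satisfies the predicate; deduce the value is rest[0] and the
    -- continuation into the replicate block stops immediately
    have hvr : pyAtA rest.reverse ((rest.length:Int) - 1)
        = pyAtA rest.reverse (((List.replicate (k+1) x ++ rest).length:Int) - 1 - i) := by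
      rcases eq_or_lt_of_le (by omega :
          ((List.replicate (k+1) x ++ rest).length:Int) - 1 - i ≤ (rest.length:Int) - 1) with he | hlt
      · rw [he]
      · have hmem : ((rest.length:Int) - 1) ∈ (PySem.List.pyRange
            (((List.replicate (k+1) x ++ rest).length:Int) - i) (rest.length:Int) 1) := by
          rw [PySem.List.mem_pyRange_one]; omega
        have : ((rest.length:Int) - 1) ∈ (PySem.List.pyRange
            (((List.replicate (k+1) x ++ rest).length:Int) - i) (rest.length:Int) 1).takeWhile
            (fun j => decide (pyAtA (List.replicate (k+1) x ++ rest).reverse j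
              = pyAtA (List.replicate (k+1) x ++ rest).reverse
                  (((List.replicate (k+1) x ++ rest).length:Int) - 1 - i))) := by
          rw [hfirst]; exact hmem
        have hp := List.mem_takeWhile_imp this
        simp only [decide_eq_true_eq] at hp
        rw [← hval, ← hp,
          pyAt_rev_decomp x k rest ((rest.length:Int) - 1) (by omega) (by omega),
          if_pos (by omega)]
    have hrev0 : pyAtA rest.reverse ((rest.length:Int) - 1) = rest[0]'hRpos := by
      rw [pyAtA, PySem.List.pyGetD_eq_getElem _ _ (by omega) (by simp),
        List.getElem_reverse]
      congr 1
      omega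
    have hx0 : rest[0]'hRpos ≠ x :=
      hstop _ (by rw [List.head?_eq_getElem?, List.getElem?_eq_getElem hRpos])
    have hsecond : (PySem.List.pyRange (rest.length:Int)
        ((List.replicate (k+1) x ++ rest).length:Int) 1).takeWhile
        (fun j => decide (pyAtA (List.replicate (k+1) x ++ rest).reverse j
          = pyAtA (List.replicate (k+1) x ++ rest).reverse
              (((List.replicate (k+1) x ++ rest).length:Int) - 1 - i))) = [] := by
      rw [PySem.List.pyRange_one_cons (by omega), List.takeWhile_cons_of_neg]
      simp only [decide_eq_true_eq]
      rw [hval, ← hvr, hrev0,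
        pyAt_rev_decomp x k rest (rest.length:Int) (by omega) (by omega),
        if_neg (by omega)]
      exact fun h => hx0 h.symm
    rw [hsecond, hfirst]
    simp
  · rw [if_neg hc]
theorem tB_le (l : List Int) (i : Int) (h0 : 0 ≤ i) : tB l i ≤ i := by
  have h := List.IsPrefix.length_le (List.takeWhile_prefix (l := PySem.List.pyRange
    ((l.length:Int) - i) (l.length:Int) 1)
    (fun j => decide (pyAtA l.reverse j = pyAtA l.reverse ((l.length:Int) - 1 - i))))
  rw [PySem.List.length_pyRange_one] at h
  unfold tB twB
  omega

theorem Fiv_low (x : Int) (k : Nat) (rest : List Int)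
    (hstop : ∀ y, rest.head? = some y → y ≠ x) (i : Int) (h0 : 0 ≤ i) (hi : i ≤ (k:Int)) :
    Fiv (List.replicate (k+1) x ++ rest) i = PySem.List.pyRange 0 ((k:Int)+1) 1 := by
  unfold Fiv
  rw [tF_low x k rest hstop i h0 hi, tB_low x k rest i h0 hi]
  congr 1 <;> ring

theorem Fiv_high (x : Int) (k : Nat) (rest : List Int)
    (hstop : ∀ y, rest.head? = some y → y ≠ x) (i : Int)
    (hi : (k:Int)+1 ≤ i) (hn : i < ((List.replicate (k+1) x ++ rest).length:Int)) :
    Fiv (List.replicate (k+1) x ++ rest) i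
      = (Fiv rest (i - ((k:Int)+1))).map (· + ((k:Int)+1)) := by
  unfold Fiv
  rw [tF_high x k rest i hi hn, tB_high x k rest hstop i hi hn, ← pyRange_map_add]
  congr 1 <;> ring
theorem ofList_map_inj (f : List Int → List Int) (hf : Function.Injective f)
    (zs : List (List Int)) :
    PySem.Set.ofList (zs.map f) = (PySem.Set.ofList zs).map f := by
  induction zs using List.reverseRecOn with
  | nil => rfl
  | append_singleton zs z ih =>
    rw [List.map_append, List.map_singleton, PySem.Set.ofList_append_singleton,
      PySem.Set.ofList_append_singleton, ih, PySem.Set.add_eq_ite, PySem.Set.add_eq_ite]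
    by_cases h : z ∈ PySem.Set.ofList zs
    · rw [if_pos (List.mem_map_of_mem h), if_pos h]
    · rw [if_neg (fun hc => h ((List.mem_map_of_injective hf).mp hc)), if_neg h,
        List.map_append, List.map_singleton]

theorem ofList_replicate (m : Nat) (v : List Int) :
    PySem.Set.ofList (List.replicate (m+1) v) = [v] := by
  induction m with
  | zero => rfl
  | succ m ih =>
    rw [List.replicate_succ, PySem.Set.ofList_cons, ih]
    simp [PySem.Set.discard]
theorem goB_nil (c : Int) : goB c [] = [] := by rw [goB]

theorem goB_cons (c : Int) (x : Int) (xs : List Int) :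
    goB c (x :: xs) = PySem.List.pyRange c (c + (runLenB x xs : Int) + 1) 1
      :: goB (c + (runLenB x xs : Int) + 1) (xs.drop (runLenB x xs)) := by
  rw [goB]

theorem goB_shift : ∀ (n : Nat) (l : List Int), l.length = n → ∀ c : Int,
    goB c l = (goB 0 l).map (List.map (· + c)) := by
  intro n
  induction n using Nat.strong_induction_on with
  | _ n ih =>
    intro l hl c
    match l with
    | [] => simp [goB_nil]
    | x :: xs =>
      rw [goB_cons, goB_cons]
      have hlen : (xs.drop (runLenB x xs)).length < n := by
        rw [← hl]
        simp
      rw [ih _ hlen _ rfl (c + (runLenB x xs : Int) + 1),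
        ih _ hlen _ rfl ((0:Int) + (runLenB x xs : Int) + 1)]
      rw [List.map_cons, List.map_map]
      congr 1
      · rw [← pyRange_map_add]
        congr 1 <;> ring
      · congr 1
        funext m
        rw [Function.comp_apply, List.map_map]
        congr 1
        funext y
        simp
        ring
theorem goB_elems : ∀ (n : Nat) (l : List Int), l.length = n → ∀ c : Int,
    ∀ m ∈ goB c l, ∃ a b : Int, a < b ∧ c ≤ a ∧ m = PySem.List.pyRange a b 1 := by
  intro n
  induction n using Nat.strong_induction_on with
  | _ n ih =>
    intro l hl c
    match l with
    | [] => intro m hm; rw [goB_nil] at hm; simp at hm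
    | x :: xs =>
      intro m hm
      rw [goB_cons] at hm
      rcases List.mem_cons.mp hm with hm | hm
      · exact ⟨c, c + (runLenB x xs : Int) + 1, by omega, le_rfl, hm⟩
      · have hlen : (xs.drop (runLenB x xs)).length < n := by rw [← hl]; simp
        obtain ⟨a, b, h1, h2, h3⟩ := ih _ hlen _ rfl _ m hm
        exact ⟨a, b, h1, by omega, h3⟩

theorem goB_pairwise : ∀ (n : Nat) (l : List Int), l.length = n → ∀ c : Int,
    (goB c l).Pairwise (· < ·) := by
  intro n
  induction n using Nat.strong_induction_on with
  | _ n ih =>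
    intro l hl c
    match l with
    | [] => rw [goB_nil]; exact List.Pairwise.nil
    | x :: xs =>
      rw [goB_cons]
      have hlen : (xs.drop (runLenB x xs)).length < n := by rw [← hl]; simp
      refine List.Pairwise.cons ?_ (ih _ hlen _ rfl _)
      intro m hm
      obtain ⟨a, b, h1, h2, h3⟩ := goB_elems _ _ rfl _ m hm
      rw [h3, PySem.List.pyRange_one_cons (by omega : c < c + (runLenB x xs : Int) + 1),
        PySem.List.pyRange_one_cons (by omega : a < b)]
      exact List.Lex.rel (by omega)
theorem main_red : ∀ (n : Nat) (l : List Int), l.length = n →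
    PySem.Set.ofList ((PySem.List.pyRange 0 (l.length:Int) 1).map (Fiv l)) = goB 0 l := by
  intro n
  induction n using Nat.strong_induction_on with
  | _ n ih =>
    intro l hl
    match l with
    | [] => simp [goB_nil, PySem.List.pyRange_one_eq_nil (by omega : (0:Int) ≤ 0)]
    | x :: xs =>
      have hdec : x :: xs = List.replicate (runLenB x xs + 1) x ++ xs.drop (runLenB x xs) := by
        rw [List.replicate_succ, List.cons_append]
        congr 1
        conv_lhs => rw [← List.take_append_drop (runLenB x xs) xs]
        rw [runLenB_take]
      have hstop : ∀ y, (xs.drop (runLenB x xs)).head? = some y → y ≠ x :=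
        fun y h => runLenB_stop x xs y h
      have hlen : (xs.drop (runLenB x xs)).length < n := by rw [← hl]; simp
      have hKn : ((List.replicate (runLenB x xs + 1) x ++ xs.drop (runLenB x xs)).length : Int)
          = ((xs.drop (runLenB x xs)).length : Int) + (runLenB x xs : Int) + 1 := by
        simp; omega
      -- right-hand side in decomposed form
      rw [goB_cons, goB_shift _ (xs.drop (runLenB x xs)) rfl]
      -- left-hand side
      rw [hdec, hKn]
      rw [PySem.List.pyRange_one_append 0 ((runLenB x xs : Int)+1)
        (((xs.drop (runLenB x xs)).length : Int) + (runLenB x xs : Int) + 1)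
        (by omega) (by omega), List.map_append]
      have hfirst : (PySem.List.pyRange 0 ((runLenB x xs : Int)+1) 1).map
            (Fiv (List.replicate (runLenB x xs + 1) x ++ xs.drop (runLenB x xs)))
          = List.replicate (runLenB x xs + 1) (PySem.List.pyRange 0 ((runLenB x xs : Int)+1) 1) := by
        rw [List.eq_replicate_iff]
        constructor
        · rw [List.length_map, PySem.List.length_pyRange_one]
          omega
        · intro b hb
          obtain ⟨i, hi, rfl⟩ := List.mem_map.mp hb
          rw [PySem.List.mem_pyRange_one] at hi
          exact Fiv_low x (runLenB x xs) _ hstop i hi.1 (by omega)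
      have hsecond : (PySem.List.pyRange ((runLenB x xs : Int)+1)
            (((xs.drop (runLenB x xs)).length : Int) + (runLenB x xs : Int) + 1) 1).map
            (Fiv (List.replicate (runLenB x xs + 1) x ++ xs.drop (runLenB x xs)))
          = ((PySem.List.pyRange 0 ((xs.drop (runLenB x xs)).length : Int) 1).map
              (Fiv (xs.drop (runLenB x xs)))).map (List.map (· + ((runLenB x xs : Int)+1))) := by
        rw [show ((runLenB x xs : Int)+1) = 0 + ((runLenB x xs : Int)+1) by ring,
          show ((xs.drop (runLenB x xs)).length : Int) + (runLenB x xs : Int) + 1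
            = ((xs.drop (runLenB x xs)).length : Int) + ((runLenB x xs : Int)+1) by ring,
          pyRange_map_add, List.map_map, List.map_map]
        apply List.map_congr_left
        intro j hj
        rw [PySem.List.mem_pyRange_one] at hj
        simp only [Function.comp_apply]
        rw [Fiv_high x (runLenB x xs) _ hstop (j + ((runLenB x xs : Int)+1)) (by omega)
          (by rw [hKn]; omega)]
        rw [show j + ((runLenB x xs : Int)+1) - ((runLenB x xs : Int)+1) = j by ring]
        simp
      rw [hfirst, hsecond, PySem.Set.ofList_append, ofList_replicate,
        PySem.Set.update_eq_append_filter]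
      have hfilter : (PySem.Set.ofList (((PySem.List.pyRange 0
            ((xs.drop (runLenB x xs)).length : Int) 1).map
            (Fiv (xs.drop (runLenB x xs)))).map (List.map (· + ((runLenB x xs : Int)+1))))).filter
            (fun y => !(PySem.Set.contains [PySem.List.pyRange 0 ((runLenB x xs : Int)+1) 1] y))
          = PySem.Set.ofList (((PySem.List.pyRange 0
            ((xs.drop (runLenB x xs)).length : Int) 1).map
            (Fiv (xs.drop (runLenB x xs)))).map (List.map (· + ((runLenB x xs : Int)+1)))) := by
        apply List.filter_eq_self.mpr
        intro y hy
        have hy' := (PySem.Set.mem_ofList _ _).mp hy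
        obtain ⟨z, hz, rfl⟩ := List.mem_map.mp hy'
        obtain ⟨j, hj, rfl⟩ := List.mem_map.mp hz
        rw [PySem.List.mem_pyRange_one] at hj
        simp only [Bool.not_eq_true']
        have htB := tB_le (xs.drop (runLenB x xs)) j hj.1
        have htB0 := tB_nonneg (xs.drop (runLenB x xs)) j
        have htF := tF_nonneg (xs.drop (runLenB x xs)) j
        have hne : (Fiv (xs.drop (runLenB x xs)) j).map (· + ((runLenB x xs : Int)+1))
            ≠ PySem.List.pyRange 0 ((runLenB x xs : Int)+1) 1 := by
          unfold Fiv
          rw [← pyRange_map_add,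
            PySem.List.pyRange_one_cons (by omega),
            PySem.List.pyRange_one_cons (by omega : (0:Int) < (runLenB x xs : Int)+1)]
          intro hcontra
          have := (List.cons.injEq _ _ _ _).mp hcontra
          omega
        simp [PySem.Set.contains, hne]
      rw [hfilter, ofList_map_inj _ (List.map_injective_iff.mpr (fun a b hab => by omega)),
        ih _ hlen _ rfl, List.singleton_append]
      congr 1
      · congr 1
        ring
      · congr 1
        funext m
        congr 1
        funext y
        ring
theorem final_eq (l : List Int) : get_equals l = get_equals_alt l := by
  rw [A_reduce, main_red _ l rfl]
  have h := PySem.List.sorted_eq_of_perm_of_pairwise_lt (goB 0 l) (goB 0 l) (fun a => a)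
    (List.Perm.refl _) (goB_pairwise _ l rfl 0)
  show PySem.List.sorted (goB 0 l) (fun x => x) false = goB 0 l
  convert h using 2

-- ===== VERDICT (by name: the statement is the Claim_ definition above) =====
theorem get_equals_spec : Claim_equal_get_equals := by
  intro lista _
  show get_equals lista = get_equals_alt lista
  exact final_eq lista
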